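-- pv_equiv track=rewrite | github.com/AkifSivas58/LeetCodeSolutions | 0853-most-profit-assigning-work/0853-most-profit-assigning-work.py | maxProfitAssignment
-- ===== SOURCE A (Python) =====
-- def maxProfitAssignment(difficulty, profit, worker):
--     jobs = list(zip(difficulty, profit))
--     jobs.sort()
--     worker.sort()
--     i = 0
--     prof = 0
--     res = 0
--     for j in range(len(worker)):
--         while i < len(jobs) and jobs[i][0] <= worker[j]:
--             prof = max(prof, jobs[i][1])
--             i += 1
--         res += prof
--
--     return res
-- ===== SOURCE B (Python) =====
-- def maxProfitAssignment(difficulty, profit, worker):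
--     # Sort jobs, build a prefix-max of profit, then binary-search each worker's
--     # ability.  worker.sort() is kept for A's observable in-place mutation.
--     jobs = sorted(zip(difficulty, profit))
--     ds = [j[0] for j in jobs]
--     best = []
--     cur = 0
--     for j in jobs:
--         cur = max(cur, j[1])
--         best.append(cur)
--     worker.sort()
--     total = 0
--     for w in worker:
--         lo, hi = 0, len(ds)
--         while lo < hi:
--             mid = (lo + hi) // 2
--             if ds[mid] <= w:
--                 lo = mid + 1
--             else:
--                 hi = mid
--         if lo:
--             total += best[lo - 1]
--     return total
-- ===== Notes on version B (the rewrite author's own statement) =====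
-- stated objective: alternative
-- what changed: Replaces the merged two-pointer sweep over sorted workers with a precomputed prefix-max profit table plus a per-worker binary search on the sorted difficulties.
import Mathlib
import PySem

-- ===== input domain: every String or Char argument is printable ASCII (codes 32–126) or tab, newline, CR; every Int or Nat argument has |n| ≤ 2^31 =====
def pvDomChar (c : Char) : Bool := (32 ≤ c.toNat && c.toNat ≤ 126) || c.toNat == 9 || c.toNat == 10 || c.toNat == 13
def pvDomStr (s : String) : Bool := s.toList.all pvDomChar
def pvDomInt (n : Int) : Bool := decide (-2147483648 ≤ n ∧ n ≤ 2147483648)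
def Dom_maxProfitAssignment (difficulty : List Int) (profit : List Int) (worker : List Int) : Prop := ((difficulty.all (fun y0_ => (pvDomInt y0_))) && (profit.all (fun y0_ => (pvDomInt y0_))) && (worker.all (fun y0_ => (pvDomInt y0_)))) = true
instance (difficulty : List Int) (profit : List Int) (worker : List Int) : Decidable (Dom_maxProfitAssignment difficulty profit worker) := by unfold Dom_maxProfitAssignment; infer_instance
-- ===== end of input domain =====

-- B replaces A's two-pointer sweep by a prefix-max table + binary search per worker (same cost class,
-- different algorithm).  Both A and B sort `worker` in place (Python side); equivalence here is about
-- the return value.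

-- ===== PORT A =====
-- the inner `while i < len(jobs) and jobs[i][0] <= worker[j]` loop, as recursion on the job suffix
def pvAInner : List (Int × Int) → Int → Int → List (Int × Int) × Int
  | [], prof, _ => ([], prof)
  | j :: rest, prof, w => if j.1 ≤ w then pvAInner rest (max prof j.2) w else (j :: rest, prof)

-- the `for j in range(len(worker))` loop over the sorted worker list
def pvALoop : List Int → List (Int × Int) → Int → Int → Int
  | [], _, _, res => res
  | w :: ws, jobs, prof, res =>
    let s := pvAInner jobs prof w
    pvALoop ws s.1 s.2 (res + s.2)

def maxProfitAssignment (difficulty : List Int) (profit : List Int) (worker : List Int) : Int :=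
  pvALoop (PySem.List.sorted worker (fun x => x))
    (PySem.List.sorted2 (difficulty.zip profit) Prod.fst Prod.snd) 0 0

-- ===== PORT B =====
-- running prefix maximum of the profits (the `best` list of Source B)
def pvBuildBest : List (Int × Int) → Int → List Int
  | [], _ => []
  | j :: rest, cur => (max cur j.2) :: pvBuildBest rest (max cur j.2)

-- Source B's hand-written bisect_right loop; ds[mid] is always in range (lo < hi ≤ len ds), so getD is exact
def pvBsr (ds : List Int) (w : Int) (lo hi : Nat) : Nat :=
  if _h : lo < hi then
    let mid := (lo + hi) / 2
    if ds.getD mid 0 ≤ w then pvBsr ds w (mid + 1) hi else pvBsr ds w lo mid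
  else lo
termination_by hi - lo
decreasing_by all_goals omega

-- the `for w in worker` loop; best[lo-1] is in range when lo ≠ 0, so getD is exact
def pvBLoop (ds best : List Int) : List Int → Int → Int
  | [], total => total
  | w :: ws, total =>
    let k := pvBsr ds w 0 ds.length
    pvBLoop ds best ws (if k ≠ 0 then total + best.getD (k - 1) 0 else total)

def maxProfitAssignment_alt (difficulty : List Int) (profit : List Int) (worker : List Int) : Int :=
  let jobs := PySem.List.sorted2 (difficulty.zip profit) Prod.fst Prod.snd
  pvBLoop (jobs.map Prod.fst) (pvBuildBest jobs 0) (PySem.List.sorted worker (fun x => x)) 0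

-- ===== PRECONDITION & SPEC =====
def Spec_maxProfitAssignment (difficulty : List Int) (profit : List Int) (worker : List Int) (out : Int) : Prop := out = maxProfitAssignment_alt difficulty profit worker
instance (difficulty : List Int) (profit : List Int) (worker : List Int) (out : Int) : Decidable (Spec_maxProfitAssignment difficulty profit worker out) := by unfold Spec_maxProfitAssignment; infer_instance

-- ===== CLAIM (what is proved, stated in full; the proofs are below) =====
def Claim_equal_maxProfitAssignment : Prop := ∀ (difficulty : List Int) (profit : List Int) (worker : List Int), Dom_maxProfitAssignment difficulty profit worker → Spec_maxProfitAssignment difficulty profit worker (maxProfitAssignment difficulty profit worker)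

-- ===== LEMMAS AND PROOFS =====

-- abbreviation used throughout: running max of the profits over a job list
def pvFmax (l : List (Int × Int)) (a : Int) : Int := l.foldl (fun m j => max m j.2) a

theorem pvFmax_append (a b : List (Int × Int)) (c : Int) :
    pvFmax (a ++ b) c = pvFmax b (pvFmax a c) := by
  simp [pvFmax, List.foldl_append]

-- sorted2 by (fst, snd) is pairwise nondecreasing on fst
theorem pvInsertBy_pairwise {α : Type} (before : α → α → Bool) (R : α → α → Prop)
    (htr : ∀ a b c, R a b → R b c → R a c)
    (h1 : ∀ a b, before a b = true → R a b) (h2 : ∀ a b, before a b = false → R b a)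
    (x : α) (ys : List α) (hp : ys.Pairwise R) :
    (PySem.List.insertBy before x ys).Pairwise R := by
  induction ys with
  | nil => simp [PySem.List.insertBy]
  | cons y ys ih =>
    rcases List.pairwise_cons.mp hp with ⟨hy, hys⟩
    by_cases hb : before x y = true
    · rw [show PySem.List.insertBy before x (y :: ys) = x :: y :: ys from by
        simp [PySem.List.insertBy, hb]]
      refine List.pairwise_cons.mpr ⟨?_, hp⟩
      intro z hz
      rcases List.mem_cons.mp hz with rfl | hz
      · exact h1 _ _ hb
      · exact htr _ _ _ (h1 _ _ hb) (hy _ hz)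
    · rw [show PySem.List.insertBy before x (y :: ys) = y :: PySem.List.insertBy before x ys from by
        simp [PySem.List.insertBy, hb]]
      refine List.pairwise_cons.mpr ⟨?_, ih hys⟩
      intro z hz
      rcases (PySem.List.mem_insertBy before x z ys).mp hz with rfl | hz
      · exact h2 _ _ (by simpa using hb)
      · exact hy _ hz

theorem pvSorted2_pairwise_fst (xs : List (Int × Int)) :
    (PySem.List.sorted2 xs Prod.fst Prod.snd).Pairwise (fun a b => a.1 ≤ b.1) := by
  show (List.foldl (fun acc x => PySem.List.insertBy _ x acc) [] xs).Pairwise _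
  generalize hacc : ([] : List (Int × Int)) = acc
  have hpacc : acc.Pairwise (fun a b : Int × Int => a.1 ≤ b.1) := by
    subst hacc; simp
  clear hacc
  induction xs generalizing acc with
  | nil => simpa using hpacc
  | cons x xs ih =>
    simp only [List.foldl_cons]
    apply ih
    refine pvInsertBy_pairwise _ (fun a b : Int × Int => a.1 ≤ b.1) (fun a b c hab hbc => le_trans hab hbc) ?_ ?_ x acc hpacc
    · intro a b h
      by_cases h1 : a.1 < b.1
      · exact le_of_lt h1
      · by_cases h2 : b.1 < a.1
        · exfalso; simp [h1, h2] at h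
        · omega
    · intro a b h
      by_cases h1 : a.1 < b.1
      · exfalso; simp [h1] at h
      · omega

-- the inner while loop splits the job suffix at the first too-hard job
theorem pvAInner_eq (js : List (Int × Int)) (prof w : Int) :
    pvAInner js prof w =
      (js.dropWhile (fun j => decide (j.1 ≤ w)),
       pvFmax (js.takeWhile (fun j => decide (j.1 ≤ w))) prof) := by
  induction js generalizing prof with
  | nil => simp [pvAInner, pvFmax]
  | cons j rest ih =>
    by_cases h : j.1 ≤ w
    · simp [pvAInner, h, List.dropWhile, List.takeWhile, ih, pvFmax]
    · simp [pvAInner, h, List.dropWhile, List.takeWhile, pvFmax]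

-- on a fst-sorted job list, filtering by ability is taking a prefix
theorem pvFilter_eq_takeWhile (js : List (Int × Int)) (w : Int)
    (hs : js.Pairwise (fun a b => a.1 ≤ b.1)) :
    js.filter (fun j => decide (j.1 ≤ w)) = js.takeWhile (fun j => decide (j.1 ≤ w)) := by
  induction js with
  | nil => rfl
  | cons j rest ih =>
    rcases List.pairwise_cons.mp hs with ⟨hj, hrest⟩
    by_cases h : j.1 ≤ w
    · simp [List.filter, List.takeWhile, h, ih hrest]
    · have hd : decide (j.1 ≤ w) = false := by simp [h]
      simp only [List.filter_cons, List.takeWhile_cons, hd, Bool.false_eq_true, if_false]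
      exact List.filter_eq_nil_iff.mpr (fun x hx => by
        have := hj x hx; simp only [decide_eq_true_eq]; omega)

-- A's worker loop computes res plus the sum of per-worker best profits
theorem pvALoop_eq (ws : List Int) (done js : List (Int × Int)) (prof res : Int)
    (hs : (done ++ js).Pairwise (fun a b => a.1 ≤ b.1))
    (hws : ws.Pairwise (fun a b => a ≤ b))
    (hdone : ∀ w ∈ ws, ∀ j ∈ done, j.1 ≤ w)
    (hprof : prof = pvFmax done 0) :
    pvALoop ws js prof res =
      res + (ws.map (fun w => pvFmax ((done ++ js).filter (fun j => decide (j.1 ≤ w))) 0)).sum := by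
  induction ws generalizing done js prof res with
  | nil => simp [pvALoop]
  | cons w ws ih =>
    rcases List.pairwise_cons.mp hws with ⟨hw, hws'⟩
    have hjs : js.Pairwise (fun a b : Int × Int => a.1 ≤ b.1) :=
      (List.pairwise_append.mp hs).2.1
    simp only [pvALoop, pvAInner_eq]
    set q : Int × Int → Bool := fun j => decide (j.1 ≤ w) with hq
    have hsplit : done ++ js.takeWhile q ++ js.dropWhile q = done ++ js := by
      rw [List.append_assoc, List.takeWhile_append_dropWhile]
    have hprof' : pvFmax (js.takeWhile q) prof = pvFmax (done ++ js.takeWhile q) 0 := by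
      rw [pvFmax_append, hprof]
    rw [ih (done ++ js.takeWhile q) (js.dropWhile q) _ _ (by rw [hsplit]; exact hs)
        hws' ?_ hprof']
    · rw [hsplit]
      have hvalw : pvFmax (js.takeWhile q) prof =
          pvFmax ((done ++ js).filter q) 0 := by
        rw [List.filter_append, pvFilter_eq_takeWhile js w hjs,
          List.filter_eq_self.mpr (fun j hj => by
            simpa [hq] using hdone w (List.mem_cons_self) j hj),
          pvFmax_append, hprof]
      simp only [List.map_cons, List.sum_cons]
      rw [hq] at hvalw
      rw [hvalw]
      ring
    · intro w' hw' j hj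
      rcases List.mem_append.mp hj with hj | hj
      · exact hdone w' (List.mem_cons_of_mem _ hw') j hj
      · have hjw : j.1 ≤ w := by simpa [hq] using List.mem_takeWhile_imp hj
        exact le_trans hjw (hw w' hw')

-- elements strictly before the takeWhile boundary satisfy the predicate; the boundary fails it
theorem pvTakeWhile_getElem_true (l : List Int) (p : Int → Bool) (i : Nat)
    (h : i < (l.takeWhile p).length) (hl : i < l.length) : p l[i] = true := by
  have hpref := List.takeWhile_prefix (l := l) (p := p)
  have : l[i] = (l.takeWhile p)[i] := (List.IsPrefix.getElem hpref h).symm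
  rw [this]
  exact List.mem_takeWhile_imp (List.getElem_mem h)

theorem pvTakeWhile_getElem_false (l : List Int) (p : Int → Bool)
    (h : (l.takeWhile p).length < l.length) : p (l[(l.takeWhile p).length]) = false := by
  induction l with
  | nil => simp at h
  | cons x xs ih =>
    by_cases hx : p x = true
    · simp only [List.takeWhile, hx] at h ⊢
      simpa [hx] using ih (by simpa using h)
    · simp only [List.takeWhile, Bool.not_eq_true] at hx
      simp [hx]

-- Source B's binary search returns the length of the ≤-prefix on a sorted list
theorem pvBsr_eq_aux (ds : List Int) (w : Int) (hs : ds.Pairwise (fun a b => a ≤ b)) :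
    ∀ n lo hi, hi - lo ≤ n → lo ≤ hi → hi ≤ ds.length →
      lo ≤ (ds.takeWhile (fun a => decide (a ≤ w))).length →
      (ds.takeWhile (fun a => decide (a ≤ w))).length ≤ hi →
      pvBsr ds w lo hi = (ds.takeWhile (fun a => decide (a ≤ w))).length := by
  intro n
  induction n with
  | zero =>
    intro lo hi hn hlohi hhilen hlot hthi
    rw [pvBsr, dif_neg (by omega)]
    omega
  | succ n ih =>
    intro lo hi hn hlohi hhilen hlot hthi
    set t := (ds.takeWhile (fun a => decide (a ≤ w))).length with ht
    by_cases h : lo < hi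
    · have hmidlt : (lo + hi) / 2 < hi := by omega
      have hmidlo : lo ≤ (lo + hi) / 2 := by omega
      have hmidlen : (lo + hi) / 2 < ds.length := by omega
      rw [pvBsr, dif_pos h]
      have hgetD : ds.getD ((lo + hi) / 2) 0 = ds[(lo + hi) / 2] := by
        simp [List.getD_eq_getElem?_getD, List.getElem?_eq_getElem hmidlen]
      by_cases hle : ds[(lo + hi) / 2] ≤ w
      · rw [if_pos (by rw [hgetD]; exact hle)]
        have hmid_lt_t : (lo + hi) / 2 < t := by
          by_contra hcon
          have htlen : t < ds.length := by omega
          have hft : (fun a => decide (a ≤ w)) ds[t] = false :=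
            pvTakeWhile_getElem_false ds _ htlen
          have hmono : ds[t] ≤ ds[(lo + hi) / 2] := by
            rcases Nat.lt_or_ge t ((lo + hi) / 2) with hlt | hge
            · exact (List.pairwise_iff_getElem.mp hs) t ((lo + hi) / 2) htlen hmidlen hlt
            · have : t = (lo + hi) / 2 := by omega
              simp [this]
          simp only [decide_eq_false_iff_not] at hft
          omega
        exact ih ((lo + hi) / 2 + 1) hi (by omega) (by omega) hhilen (by omega) hthi
      · rw [if_neg (by rw [hgetD]; exact hle)]
        have ht_le_mid : t ≤ (lo + hi) / 2 := by
          by_contra hcon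
          have : (fun a => decide (a ≤ w)) ds[(lo + hi) / 2] = true :=
            pvTakeWhile_getElem_true ds (fun a => decide (a ≤ w)) ((lo + hi) / 2) (by omega) hmidlen
          simp only [decide_eq_true_eq] at this
          omega
        exact ih lo ((lo + hi) / 2) (by omega) hmidlo (by omega) hlot ht_le_mid
    · rw [pvBsr, dif_neg h]
      omega

theorem pvBsr_eq (ds : List Int) (w : Int) (hs : ds.Pairwise (fun a b => a ≤ b)) :
    pvBsr ds w 0 ds.length = (ds.takeWhile (fun a => decide (a ≤ w))).length :=
  pvBsr_eq_aux ds w hs ds.length 0 ds.length (by omega) (Nat.zero_le _) le_rfl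
    (Nat.zero_le _) ((List.takeWhile_prefix _).length_le)

-- the prefix-max table looked up at i is the running max of the first i+1 profits
theorem pvBuildBest_getD (js : List (Int × Int)) (cur : Int) (i : Nat) (h : i < js.length) :
    (pvBuildBest js cur).getD i 0 = pvFmax (js.take (i + 1)) cur := by
  induction js generalizing cur i with
  | nil => simp at h
  | cons j rest ih =>
    cases i with
    | zero => simp [pvBuildBest, pvFmax]
    | succ i =>
      have : pvFmax (j :: rest.take (i + 1)) cur = pvFmax (rest.take (i + 1)) (max cur j.2) := by
        simp [pvFmax]
      simp only [pvBuildBest, List.getD_cons_succ, List.take_succ_cons, this]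
      exact ih (max cur j.2) i (by simpa using h)

-- B's per-worker contribution is the best profit among jobs within ability
theorem pvBStep (js : List (Int × Int)) (w : Int)
    (hs : js.Pairwise (fun a b => a.1 ≤ b.1)) :
    (let k := pvBsr (js.map Prod.fst) w 0 (js.map Prod.fst).length
     if k ≠ 0 then (pvBuildBest js 0).getD (k - 1) 0 else 0) =
      pvFmax (js.filter (fun j => decide (j.1 ≤ w))) 0 := by
  have hds : (js.map Prod.fst).Pairwise (fun a b => a ≤ b) := by
    exact List.pairwise_map.mpr hs
  have htw : (js.map Prod.fst).takeWhile (fun a => decide (a ≤ w)) =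
      (js.takeWhile (fun j => decide (j.1 ≤ w))).map Prod.fst := by
    rw [List.takeWhile_map]
    rfl
  set t := (js.takeWhile (fun j => decide (j.1 ≤ w))).length with ht
  have htlen : ((js.map Prod.fst).takeWhile (fun a => decide (a ≤ w))).length = t := by
    rw [htw, List.length_map]
  have hk : pvBsr (js.map Prod.fst) w 0 (js.map Prod.fst).length = t := by
    rw [pvBsr_eq _ w hds, htlen]
  have htake : js.take t = js.takeWhile (fun j => decide (j.1 ≤ w)) := by
    rcases List.takeWhile_prefix (l := js) (p := fun j => decide (j.1 ≤ w)) with ⟨rest, hrest⟩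
    conv_lhs => rw [← hrest]
    rw [ht, List.take_left]
  rw [← pvFilter_eq_takeWhile js w hs] at htake
  simp only [hk]
  by_cases h0 : t = 0
  · have : js.filter (fun j => decide (j.1 ≤ w)) = [] := by
      rw [← htake, h0, List.take_zero]
    simp [h0, this, pvFmax]
  · have htle : t ≤ js.length := by simpa using (List.takeWhile_prefix (l := js) (p := fun j => decide (j.1 ≤ w))).length_le
    rw [if_pos h0, pvBuildBest_getD js 0 (t - 1) (by omega),
      Nat.sub_add_cancel (Nat.one_le_iff_ne_zero.mpr h0), htake]

-- B's worker loop sums the per-worker best profits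
theorem pvBLoop_eq (js : List (Int × Int)) (hs : js.Pairwise (fun a b => a.1 ≤ b.1))
    (ws : List Int) (total : Int) :
    pvBLoop (js.map Prod.fst) (pvBuildBest js 0) ws total =
      total + (ws.map (fun w => pvFmax (js.filter (fun j => decide (j.1 ≤ w))) 0)).sum := by
  induction ws generalizing total with
  | nil => simp [pvBLoop]
  | cons w ws ih =>
    have hstep := pvBStep js w hs
    simp only [pvBLoop]
    rw [ih]
    simp only [List.map_cons, List.sum_cons]
    by_cases h0 : pvBsr (js.map Prod.fst) w 0 (js.map Prod.fst).length ≠ 0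
    · simp only [if_pos h0] at hstep ⊢
      rw [← hstep]; ring
    · simp only [if_neg h0] at hstep ⊢
      rw [← hstep]; ring

-- ===== VERDICT (by name: the statement is the Claim_ definition above) =====
theorem maxProfitAssignment_spec : Claim_equal_maxProfitAssignment := by
  intro difficulty profit worker _
  unfold Spec_maxProfitAssignment maxProfitAssignment maxProfitAssignment_alt
  set js := PySem.List.sorted2 (difficulty.zip profit) Prod.fst Prod.snd with hjs
  have hs : js.Pairwise (fun a b => a.1 ≤ b.1) := pvSorted2_pairwise_fst _
  have hws : (PySem.List.sorted worker (fun x => x)).Pairwise (fun a b => a ≤ b) :=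
    PySem.List.sorted_pairwise worker (fun x => x)
  rw [pvALoop_eq (PySem.List.sorted worker (fun x => x)) [] js 0 0 (by simpa using hs) hws
    (by simp) (by simp [pvFmax]),
    pvBLoop_eq js hs]
  simp
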